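-- pv_equiv track=rewrite | github.com/jkjan/PS | Kakao_2022_2/line fintech.py | solution
-- ===== SOURCE A (Python) =====
-- def solution(arr):
--     FLAT = 0  # 평평함 (처음에는 평평)
--     ASCENDING = 1 # 올라가는 중
--     DESCENDING = 2 # 내려가는 중
--
--     s = 0
--     cnt = 0
--     peak = -1
--     status = FLAT
--
--     for i in range(1, len(arr)):
--         if arr[i-1] < arr[i]:  # 올라감
--             if status != ASCENDING: # 처음 올라가는 거면 s, peak 초기화
--                 s = i - 1
--                 peak = -1
--             status = ASCENDING
--
--         elif arr[i-1] == arr[i]: # 평평함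
--             # s, peak 초기화
--             s = i
--             peak = -1
--             status = FLAT
--
--         else: # 내려감
--             if status == FLAT:
--                 # 처음 내려가는 거면 s, peak 초기화
--                 s = i
--                 peak = -1
--             else:
--                 # 올라갔다가 내려온 거면 피크 설정
--                 if status == ASCENDING:
--                     peak = i - 1
--
--                 # 이전에 피크가 설정돼있었다면 A 배열의 일부이므로 전체 개수 올림
--                 if peak != -1:
--                     cnt += peak - s
--
--             status = DESCENDING
--
--     return cnt
-- ===== SOURCE B (Python) =====
-- def solution(arr):
--     if not arr:
--         return 0
--     # forward pass: ups[i] = length of strictly ascending run ending at i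
--     ups = [0]
--     for a, b in zip(arr, arr[1:]):
--         ups.append(ups[-1] + 1 if a < b else 0)
--     # backward pass: d = strictly descending run length starting at x; add ups[i]*d
--     total = 0
--     d = 0
--     nxt = None
--     for x, u in reversed(list(zip(arr, ups))):
--         d = d + 1 if nxt is not None and x > nxt else 0
--         total += u * d
--         nxt = x
--     return total
-- ===== Notes on version B (the rewrite author's own statement) =====
-- stated objective: alternative
-- what changed: Replaces A's forward three-state (FLAT/ASCENDING/DESCENDING) machine with index bookkeeping (s, peak) by two run-length passes: a forward pass building the array of strictly-ascending run lengths and a backward pass maintaining the strictly-descending run length, summing up[i]*down[i] over all positions.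
import Mathlib
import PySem

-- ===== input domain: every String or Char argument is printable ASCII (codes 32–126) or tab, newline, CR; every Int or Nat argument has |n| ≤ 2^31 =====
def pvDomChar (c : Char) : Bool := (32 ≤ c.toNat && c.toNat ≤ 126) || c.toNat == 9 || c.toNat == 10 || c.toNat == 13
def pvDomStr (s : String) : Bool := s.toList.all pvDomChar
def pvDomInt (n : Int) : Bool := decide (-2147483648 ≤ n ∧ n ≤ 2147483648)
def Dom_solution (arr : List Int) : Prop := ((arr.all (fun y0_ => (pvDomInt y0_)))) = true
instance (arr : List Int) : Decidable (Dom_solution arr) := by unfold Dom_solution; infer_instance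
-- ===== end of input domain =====

-- B replaces A's forward three-state machine (indices s/peak, status FLAT/ASCENDING/DESCENDING)
-- by two run-length passes: forward ascending-run lengths, backward descending-run lengths,
-- summing their products (objective: alternative decomposition, same O(n) cost).

-- ===== PORT A =====
-- loop body of A's for-loop; state = (s, cnt, peak, status); FLAT=0, ASCENDING=1, DESCENDING=2.
-- arr[i-1] / arr[i] are ported as pyGetD with default 0: every i drawn from range(1, len(arr))
-- is in range, so the default is never read and the port is exact.
def aBody (arr : List Int) (st : Int × Int × Int × Int) (i : Int) : Int × Int × Int × Int :=
  let s := st.1; let cnt := st.2.1; let peak := st.2.2.1; let status := st.2.2.2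
  let prev := PySem.List.pyGetD arr (i - 1) 0
  let cur := PySem.List.pyGetD arr i 0
  if prev < cur then
    if status ≠ 1 then (i - 1, cnt, -1, 1) else (s, cnt, peak, 1)
  else if prev = cur then (i, cnt, -1, 0)
  else if status = 0 then (i, cnt, -1, 2)
  else
    let peak' := if status = 1 then i - 1 else peak
    let cnt' := if peak' ≠ -1 then cnt + (peak' - s) else cnt
    (s, cnt', peak', 2)

def solution (arr : List Int) : Int :=
  ((PySem.List.pyRange 1 (arr.length : Int) 1).foldl (aBody arr) (0, 0, -1, 0)).2.1

-- ===== PORT B =====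
-- forward pass of Source B: ascending-run lengths; the full ups list is 0 :: upsFrom 0 (adjacent pairs)
def upsFrom (u : Int) : List (Int × Int) → List Int
  | [] => []
  | ab :: ps => let u' := if ab.1 < ab.2 then u + 1 else 0
                u' :: upsFrom u' ps

-- backward pass of Source B (loop over reversed(list(zip(arr, ups)))): d = descending-run length
def sumDown : Option Int → Int → Int → List (Int × Int) → Int
  | _, _, total, [] => total
  | nxt, d, total, xu :: rest =>
    let d' := match nxt with
      | none => 0
      | some nx => if xu.1 > nx then d + 1 else 0
    sumDown (some xu.1) d' (total + xu.2 * d') rest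

def solution_alt (arr : List Int) : Int :=
  match arr with
  | [] => 0
  | _ :: _ =>
    let ups := 0 :: upsFrom 0 (arr.zip arr.tail)
    sumDown none 0 0 ((arr.zip ups).reverse)

-- ===== PRECONDITION & SPEC =====
def Spec_solution (arr : List Int) (out : Int) : Prop := out = solution_alt arr
instance (arr : List Int) (out : Int) : Decidable (Spec_solution arr out) := by unfold Spec_solution; infer_instance

-- ===== CLAIM (what is proved, stated in full; the proofs are below) =====
def Claim_equal_solution : Prop := ∀ (arr : List Int), Dom_solution arr → Spec_solution arr (solution arr)

-- ===== LEMMAS AND PROOFS =====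

-- Common middle spec: one forward fold over adjacent pairs carrying
-- (u = current ascending-run length, p = ascent length of the active peak, cnt).
def gstep (st : Int × Int × Int) (ab : Int × Int) : Int × Int × Int :=
  if ab.1 < ab.2 then (st.1 + 1, 0, st.2.2)
  else if ab.1 = ab.2 then (0, 0, st.2.2)
  else (0, if 0 < st.1 then st.1 else st.2.1, st.2.2 + (if 0 < st.1 then st.1 else st.2.1))

def g (arr : List Int) : Int × Int × Int := (arr.zip arr.tail).foldl gstep (0, 0, 0)

-- U x zs: sum of the u-components over the maximal prefix of zs that keeps strictly descending
-- when read right-to-left starting below x (zs is a reversed (value, up) list).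
def U : Int → List (Int × Int) → Int
  | _, [] => 0
  | x, lu :: zs => if lu.1 > x then lu.2 + U lu.1 zs else 0

lemma zip_tail_snoc (arr : List Int) (x : Int) (h : arr ≠ []) :
    (arr ++ [x]).zip (arr ++ [x]).tail = arr.zip arr.tail ++ [(arr.getLastD 0, x)] := by
  induction arr with
  | nil => exact absurd rfl h
  | cons a rest ih =>
    cases rest with
    | nil => simp [List.zip]
    | cons b t =>
      have := ih (by simp)
      simp only [List.cons_append, List.tail_cons, List.zip_cons_cons] at this ⊢
      rw [this]
      simp

lemma g_snoc (arr : List Int) (x : Int) (h : arr ≠ []) :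
    g (arr ++ [x]) = gstep (g arr) (arr.getLastD 0, x) := by
  unfold g
  rw [zip_tail_snoc arr x h, List.foldl_append]
  rfl

lemma length_upsFrom (u : Int) (ps : List (Int × Int)) : (upsFrom u ps).length = ps.length := by
  induction ps generalizing u with
  | nil => rfl
  | cons p ps ih => simp [upsFrom, ih]

lemma upsFrom_snoc (ps : List (Int × Int)) (u : Int) (ab : Int × Int) :
    upsFrom u (ps ++ [ab]) =
      upsFrom u ps ++ [if ab.1 < ab.2 then (upsFrom u ps).getLastD u + 1 else 0] := by
  induction ps generalizing u with
  | nil => simp [upsFrom]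
  | cons q ps ih =>
    simp only [List.cons_append, upsFrom, ih, List.getLastD_cons]

lemma sumDown_add (zs : List (Int × Int)) (nxt : Option Int) (d t : Int) :
    sumDown nxt d t zs = t + sumDown nxt d 0 zs := by
  induction zs generalizing nxt d t with
  | nil => simp [sumDown]
  | cons xu rest ih =>
    cases nxt with
    | none =>
      simp only [sumDown]
      rw [ih (some xu.1) 0 (t + xu.2 * 0), ih (some xu.1) 0 (0 + xu.2 * 0)]
      ring
    | some nx =>
      by_cases hc : xu.1 > nx
      · simp only [sumDown, if_pos hc]
        rw [ih (some xu.1) (d + 1) (t + xu.2 * (d + 1)), ih (some xu.1) (d + 1) (0 + xu.2 * (d + 1))]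
        ring
      · simp only [sumDown, if_neg hc]
        rw [ih (some xu.1) 0 (t + xu.2 * 0), ih (some xu.1) 0 (0 + xu.2 * 0)]
        ring

lemma sumDown_d (zs : List (Int × Int)) (x d t : Int) :
    sumDown (some x) d t zs = sumDown (some x) 0 t zs + d * U x zs := by
  induction zs generalizing x d t with
  | nil => simp [sumDown, U]
  | cons lu rest ih =>
    simp only [sumDown, U]
    by_cases hgt : lu.1 > x
    · simp only [if_pos hgt]
      rw [ih lu.1 (d + 1) (t + lu.2 * (d + 1)), ih lu.1 (0 + 1) (t + lu.2 * (0 + 1)),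
          sumDown_add rest (some lu.1) 0 (t + lu.2 * (d + 1)),
          sumDown_add rest (some lu.1) 0 (t + lu.2 * (0 + 1))]
      ring
    · simp [hgt]

def gInv (st : Int × Int × Int) : Prop := 0 ≤ st.1 ∧ 0 ≤ st.2.1 ∧ (0 < st.1 → st.2.1 = 0)

lemma gInv_foldl (ps : List (Int × Int)) (st : Int × Int × Int) (h : gInv st) :
    gInv (ps.foldl gstep st) := by
  induction ps generalizing st with
  | nil => exact h
  | cons ab ps ih =>
    refine ih _ ?_
    obtain ⟨h1, h2, h3⟩ := h
    unfold gstep gInv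
    split_ifs with hlt heq <;> simp_all <;> omega

lemma gInv_g (arr : List Int) : gInv (g arr) := gInv_foldl _ _ ⟨le_refl 0, le_refl 0, by omega⟩

-- ===== Lemma B: solution_alt agrees with the middle spec =====

def BInv (arr : List Int) : Prop :=
  sumDown none 0 0 ((arr.zip (0 :: upsFrom 0 (arr.zip arr.tail))).reverse) = (g arr).2.2
  ∧ (upsFrom 0 (arr.zip arr.tail)).getLastD 0 = (g arr).1
  ∧ ∃ r, (arr.zip (0 :: upsFrom 0 (arr.zip arr.tail))).reverse = (arr.getLastD 0, (g arr).1) :: r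
         ∧ U (arr.getLastD 0) r = (g arr).2.1

lemma getLastD_concat' {α : Type} (l : List α) (a : α) : ∀ d, (l ++ [a]).getLastD d = a := by
  induction l with
  | nil => intro d; rfl
  | cons b t ih => intro d; rw [List.cons_append, List.getLastD_cons]; exact ih b

lemma length_ups (arr : List Int) (h : arr ≠ []) :
    (0 :: upsFrom 0 (arr.zip arr.tail)).length = arr.length := by
  cases arr with
  | nil => exact absurd rfl h
  | cons a t => simp [length_upsFrom, List.length_zip]

lemma bInv_all (arr : List Int) (h : arr ≠ []) : BInv arr := by
  induction arr using List.reverseRecOn with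
  | nil => exact absurd rfl h
  | append_singleton ys x ih =>
    cases ys with
    | nil =>
      refine ⟨by norm_num [g, sumDown, upsFrom], rfl, [], rfl, rfl⟩
    | cons a t =>
      have hne : (a :: t) ≠ [] := by simp
      obtain ⟨ih1, ih2, r, ihr, ihU⟩ := ih hne
      obtain ⟨hu0, hp0, hup0⟩ := gInv_g (a :: t)
      have hps := zip_tail_snoc (a :: t) x hne
      have hg := g_snoc (a :: t) x hne
      have hlen := (length_ups (a :: t) hne).symm
      have hlast : ((a :: t) ++ [x]).getLastD 0 = x := getLastD_concat' _ x 0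
      -- name the recurring objects
      generalize hl : (a :: t).getLastD 0 = l at hps hg ihr ihU
      generalize hold : upsFrom 0 ((a :: t).zip (a :: t).tail) = old at ih1 ih2 ihr hlen
      generalize hgv : g (a :: t) = gv at ih1 ih2 ihr ihU hg hu0 hp0 hup0
      obtain ⟨u, p, c⟩ := gv
      simp only at ih1 ih2 ihr ihU hu0 hp0 hup0
      have hup : upsFrom 0 ((a :: t).zip (a :: t).tail ++ [(l, x)])
          = old ++ [if l < x then u + 1 else 0] := by
        rw [upsFrom_snoc, hold, ih2]
      have hzip : ((a :: t) ++ [x]).zip (0 :: (old ++ [if l < x then u + 1 else 0]))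
          = (a :: t).zip (0 :: old) ++ [(x, if l < x then u + 1 else 0)] := by
        rw [← List.cons_append, List.zip_append hlen]
        rfl
      have hrev : (((a :: t) ++ [x]).zip
            (0 :: upsFrom 0 (((a :: t) ++ [x]).zip ((a :: t) ++ [x]).tail))).reverse
          = (x, if l < x then u + 1 else 0) :: (l, u) :: r := by
        rw [hps, hup, hzip, List.reverse_append, ihr]
        rfl
      refine ⟨?_, ?_, (l, u) :: r, ?_, ?_⟩
      · -- totals agree
        rw [hrev, hg]
        rw [ihr] at ih1
        simp only [sumDown, gstep]
        simp only [sumDown] at ih1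
        norm_num at ih1 ⊢
        rcases lt_trichotomy l x with hc | hc | hc
        · simp only [if_neg (show ¬ x < l by omega), if_pos hc]
          exact ih1
        · simp only [if_neg (show ¬ x < l by omega), if_neg (show ¬ l < x by omega), if_pos hc]
          exact ih1
        · simp only [if_pos hc, if_neg (show ¬ l < x by omega), if_neg (show l ≠ x by omega)]
          rw [sumDown_d r l 1 u, sumDown_add r (some l) 0 u, ih1, ihU]
          rcases lt_or_ge 0 u with hgt | hle
          · rw [if_pos hgt]
            have := hup0 hgt
            omega
          · rw [if_neg (by omega)]
            omega
      · rw [hps, hup, getLastD_concat', hg]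
        simp only [gstep]
        rcases lt_trichotomy l x with hc | hc | hc
        · rw [if_pos hc, if_pos hc]
        · rw [if_neg (by omega), if_neg (by omega), if_pos (by omega)]
        · rw [if_neg (by omega), if_neg (by omega), if_neg (by omega)]
      · rw [hrev, hlast, hg]
        simp only [gstep]
        rcases lt_trichotomy l x with hc | hc | hc
        · rw [if_pos hc, if_pos hc]
        · rw [if_neg (by omega), if_neg (by omega), if_pos (by omega)]
        · rw [if_neg (by omega), if_neg (by omega), if_neg (by omega)]
      · rw [hlast, hg]
        simp only [U, gstep]
        rcases lt_trichotomy l x with hc | hc | hc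
        · rw [if_neg (by omega), if_pos hc]
        · rw [if_neg (by omega), if_neg (by omega), if_pos (by omega)]
        · rw [if_pos hc, if_neg (by omega), if_neg (by omega), ihU]
          show u + p = if 0 < u then u else p
          rcases lt_or_ge 0 u with hgt | hle
          · rw [if_pos hgt]
            have := hup0 hgt
            omega
          · rw [if_neg (by omega)]
            omega

-- ===== Lemma A: solution agrees with the middle spec =====

def AInv (arr : List Int) : Prop :=
  let st := (PySem.List.pyRange 1 (arr.length : Int) 1).foldl (aBody arr) (0, 0, -1, 0)
  let gv := g arr
  st.2.1 = gv.2.2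
  ∧ (st.2.2.2 = 0 ∨ st.2.2.2 = 1 ∨ st.2.2.2 = 2)
  ∧ (st.2.2.2 = 0 → gv.1 = 0 ∧ gv.2.1 = 0)
  ∧ (st.2.2.2 = 1 → gv.1 = (arr.length : Int) - 1 - st.1 ∧ 0 < gv.1 ∧ gv.2.1 = 0)
  ∧ (st.2.2.2 = 2 → gv.1 = 0 ∧ (st.2.2.1 = -1 → gv.2.1 = 0)
       ∧ (st.2.2.1 ≠ -1 → gv.2.1 = st.2.2.1 - st.1))

lemma pyGetD_append_lt (ys : List Int) (x d i : Int) (h0 : 0 ≤ i) (h1 : i < (ys.length : Int)) :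
    PySem.List.pyGetD (ys ++ [x]) i d = PySem.List.pyGetD ys i d := by
  rw [PySem.List.pyGetD_eq_getElem _ d h0 (by simp; omega),
      PySem.List.pyGetD_eq_getElem _ d h0 h1]
  rw [List.getElem_append_left (by omega)]

lemma pyGetD_concat_len (ys : List Int) (x d : Int) :
    PySem.List.pyGetD (ys ++ [x]) ((ys.length : Int)) d = x := by
  rw [PySem.List.pyGetD_eq_getElem _ d (by positivity) (by simp)]
  simp

lemma pyGetD_concat_pred (ys : List Int) (x d : Int) (h : ys ≠ []) :
    PySem.List.pyGetD (ys ++ [x]) ((ys.length : Int) - 1) d = ys.getLastD d := by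
  have hpos : 0 < ys.length := List.length_pos_iff.mpr h
  rw [PySem.List.pyGetD_eq_getElem _ d (by omega) (by simp only [List.length_append]; push_cast; omega)]
  rw [List.getElem_append_left (by omega)]
  rw [List.getLastD_eq_getLast?, List.getLast?_eq_getElem?]
  rw [List.getElem?_eq_getElem (by omega)]
  congr 1
  omega

lemma aInv_all (arr : List Int) (h : arr ≠ []) : AInv arr := by
  induction arr using List.reverseRecOn with
  | nil => exact absurd rfl h
  | append_singleton ys0 x ih =>
    cases ys0 with
    | nil =>
      refine ⟨rfl, Or.inl rfl, fun _ => ⟨rfl, rfl⟩, fun hc => by simp at hc, fun hc => by simp at hc⟩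
    | cons a t =>
      set ys := a :: t with hys
      have hne : ys ≠ [] := by simp [hys]
      obtain ⟨ih1, ihdis, ihf, iha, ihd⟩ := ih hne
      obtain ⟨hu0, hp0, hup0⟩ := gInv_g ys
      have hg := g_snoc ys x hne
      have hcast : ((ys ++ [x]).length : Int) = (ys.length : Int) + 1 := by
        simp
      have hlenpos : (1 : Int) ≤ (ys.length : Int) := by
        have : 0 < ys.length := List.length_pos_iff.mpr hne
        omega
      have hagree : ∀ (acc : Int × Int × Int × Int), ∀ i ∈ PySem.List.pyRange 1 (ys.length : Int),
          aBody (ys ++ [x]) acc i = aBody ys acc i := by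
        intro acc i hi
        rw [PySem.List.mem_pyRange_one] at hi
        unfold aBody
        rw [pyGetD_append_lt _ _ _ _ (by omega) (by omega),
            pyGetD_append_lt _ _ _ _ (by omega) (by omega)]
      generalize hl : ys.getLastD 0 = l at hg
      generalize hgv : g ys = gv at ih1 ihf iha ihd hg hu0 hp0 hup0
      obtain ⟨u, p, c⟩ := gv
      generalize hst : (PySem.List.pyRange 1 (ys.length : Int)).foldl (aBody ys) (0, 0, -1, 0) = st at ih1 ihdis ihf iha ihd
      obtain ⟨s, cnt, peak, status⟩ := st
      simp only at ih1 ihdis ihf iha ihd hu0 hp0 hup0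
      unfold AInv
      rw [hcast, PySem.List.pyRange_one_succ_right hlenpos, List.foldl_append,
          PySem.List.foldl_congr_mem _ _ _ _ hagree, hst, hg]
      simp only [List.foldl_cons, List.foldl_nil, aBody,
                 pyGetD_concat_pred ys x 0 hne, pyGetD_concat_len ys x 0, hl]
      rcases ihdis with hs | hs | hs <;> subst hs
      · -- status = 0 (FLAT)
        obtain ⟨hu, hp⟩ := ihf rfl
        subst hu
        subst hp
        rcases lt_trichotomy l x with hc | hc | hc
        · norm_num [gstep, hc]
          try omega
        · norm_num [gstep, hc, show ¬ l < x from by omega]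
          try omega
        · norm_num [gstep, hc, show ¬ l < x from by omega, show l ≠ x from by omega]
          try omega
      · -- status = 1 (ASCENDING)
        obtain ⟨hu, hupos, hp⟩ := iha rfl
        subst hp
        rcases lt_trichotomy l x with hc | hc | hc
        · norm_num [gstep, hc]
          try omega
        · norm_num [gstep, hc, show ¬ l < x from by omega]
          try omega
        · norm_num [gstep, hc, show ¬ l < x from by omega, show l ≠ x from by omega,
                    show ((ys.length : Int) - 1) ≠ -1 from by omega, hupos]
          try omega
      · -- status = 2 (DESCENDING)
        obtain ⟨hu, hpm, hpv⟩ := ihd rfl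
        subst hu
        rcases lt_trichotomy l x with hc | hc | hc
        · norm_num [gstep, hc]
          try omega
        · norm_num [gstep, hc, show ¬ l < x from by omega]
          try omega
        · by_cases hpk : peak = -1
          · norm_num [gstep, hc, show ¬ l < x from by omega, show l ≠ x from by omega, hpk]
            have := hpm hpk
            try omega
          · norm_num [gstep, hc, show ¬ l < x from by omega, show l ≠ x from by omega, hpk]
            have := hpv hpk
            try omega

-- ===== VERDICT (by name: the statement is the Claim_ definition above) =====
theorem solution_spec : Claim_equal_solution := by
  intro arr _
  unfold Spec_solution
  cases arr with
  | nil =>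
    simp [solution, solution_alt, PySem.List.pyRange_one_eq_nil]
  | cons a t =>
    have hA := aInv_all (a :: t) (by simp)
    have hB := bInv_all (a :: t) (by simp)
    unfold AInv at hA
    unfold BInv at hB
    show ((PySem.List.pyRange 1 _ 1).foldl (aBody _) (0, 0, -1, 0)).2.1 = _
    rw [hA.1, ← hB.1]
    rfl
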